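-- pv_equiv track=rewrite | github.com/kkbughunter/Design_and_Analysis_of_Algorithms | Assignment_02/Q3_freq.py | most_frequent_chars1
-- ===== SOURCE A (Python) =====
-- def most_frequent_chars1(s):
--     max_count = 0
--     res = []
--     for i in range(len(s)):
--         count = 1
--         for j in range(i+1, len(s)):
--             if s[i] == s[j]:
--                 count += 1
--         if count > max_count:
--             max_count = count
--             res = [s[i]]
--         elif count == max_count:
--             res.append(s[i])
--     return res
-- ===== SOURCE B (Python) =====
-- def most_frequent_chars1(s):
--     if not s:
--         return []
--     counts = {}
--     for ch in s:
--         counts[ch] = counts.get(ch, 0) + 1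
--     m = max(counts.values())
--     return [ch for ch in counts if counts[ch] == m]
-- ===== Notes on version B (the rewrite author's own statement) =====
-- stated objective: faster
-- what changed: A recounts each character's occurrences in the remaining suffix with a nested loop while tracking a running maximum; B builds a dict of total counts in one pass, takes the maximum count, and returns the keys (first-occurrence order) that attain it.
import Mathlib
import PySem

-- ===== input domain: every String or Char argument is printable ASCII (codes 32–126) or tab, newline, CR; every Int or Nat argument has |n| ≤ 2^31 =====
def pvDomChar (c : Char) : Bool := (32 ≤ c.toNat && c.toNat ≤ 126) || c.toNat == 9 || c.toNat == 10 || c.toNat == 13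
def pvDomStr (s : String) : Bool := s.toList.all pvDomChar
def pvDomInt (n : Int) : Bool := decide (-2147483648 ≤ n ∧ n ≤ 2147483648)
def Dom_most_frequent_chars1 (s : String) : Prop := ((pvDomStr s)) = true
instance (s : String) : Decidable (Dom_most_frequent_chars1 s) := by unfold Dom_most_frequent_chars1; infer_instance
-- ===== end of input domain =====

-- B replaces A's quadratic per-position suffix re-count with one counting pass over the
-- string (a dict of totals) and a filter of the keys at the maximal count (objective: faster).

-- ===== PORT A =====
-- s[i] is the i-th character as a 1-character string: cs is that list; indices produced by
-- range(len(s)) are always in range, so pyGetD's default is never consulted.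
def most_frequent_chars1 (s : String) : List String :=
  let cs : List String := s.toList.map (fun c => String.mk [c])
  let n : Int := PySem.Str.len s
  ((PySem.List.pyRange 0 n 1).foldl
    (fun (st : Int × List String) i =>
      let count : Int := (PySem.List.pyRange (i + 1) n 1).foldl
        (fun c j => if PySem.List.pyGetD cs i "" == PySem.List.pyGetD cs j "" then c + 1 else c) 1
      if count > st.1 then (count, [PySem.List.pyGetD cs i ""])
      else if count == st.1 then (st.1, st.2 ++ [PySem.List.pyGetD cs i ""])
      else st)
    (0, [])).2

-- ===== PORT B =====
def most_frequent_chars1_alt (s : String) : List String :=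
  let cs : List String := s.toList.map (fun c => String.mk [c])
  if cs.isEmpty then []
  else
    let counts := cs.foldl (fun d ch => d.insert ch (d.getD ch 0 + 1))
      (PySem.Dict.empty (κ := String) (ν := Int))
    match PySem.List.max? counts.values (fun v => v) with
    | none => []   -- unreachable: counts is nonempty since s is
    | some m => counts.keys.filter (fun k => counts.getD k 0 == m)

-- ===== PRECONDITION & SPEC =====
def Spec_most_frequent_chars1 (s : String) (out : List String) : Prop := out = most_frequent_chars1_alt s
instance (s : String) (out : List String) : Decidable (Spec_most_frequent_chars1 s out) := by unfold Spec_most_frequent_chars1; infer_instance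

-- ===== CLAIM (what is proved, stated in full; the proofs are below) =====
def Claim_equal_most_frequent_chars1 : Prop := ∀ (s : String), Dom_most_frequent_chars1 s → Spec_most_frequent_chars1 s (most_frequent_chars1 s)

-- ===== LEMMAS AND PROOFS =====

-- A's outer loop as structural recursion on the remaining list: the suffix count of s[i]
-- is 1 + (count of the head in the tail).
def pvLoopA : (Int × List String) → List String → Int × List String
  | st, [] => st
  | st, x :: t =>
    let cnt : Int := 1 + t.count x
    if cnt > st.1 then pvLoopA (cnt, [x]) t
    else if cnt = st.1 then pvLoopA (st.1, st.2 ++ [x]) t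
    else pvLoopA st t

-- maximal multiplicity in a list
def pvMc : List String → Int
  | [] => 0
  | x :: t => max ((t.count x : Int) + 1) (pvMc t)

-- first occurrences whose multiplicity is v
def pvFilt (t : List String) (v : Int) : List String :=
  (PySem.List.dedup t).filter (fun x => ((t.count x : Int) == v))

theorem pvMc_nonneg (t : List String) : 0 ≤ pvMc t := by
  induction t with
  | nil => simp [pvMc]
  | cons x t ih => simp only [pvMc]; positivity

theorem pvMc_ub (t : List String) : ∀ y ∈ t, (t.count y : Int) ≤ pvMc t := by
  induction t with
  | nil => simp
  | cons x t ih =>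
    intro y hy
    by_cases hxy : y = x
    · subst hxy
      rw [List.count_cons_self]
      simp only [pvMc]
      push_cast; omega
    · have hyt : y ∈ t := (List.mem_cons.1 hy).resolve_left hxy
      rw [List.count_cons_of_ne (Ne.symm hxy)]
      simp only [pvMc]
      have := ih y hyt
      omega

theorem pvMc_mem (t : List String) (h : t ≠ []) : ∃ y ∈ t, (t.count y : Int) = pvMc t := by
  induction t with
  | nil => exact absurd rfl h
  | cons x t ih =>
    by_cases hle : pvMc t ≤ (t.count x : Int) + 1
    · refine ⟨x, List.mem_cons_self, ?_⟩
      rw [List.count_cons_self]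
      simp only [pvMc]
      push_cast; omega
    · push_neg at hle
      have ht : t ≠ [] := by
        intro hnil; subst hnil; simp [pvMc] at hle
      obtain ⟨y, hyt, hyc⟩ := ih ht
      have hxy : y ≠ x := by
        intro he; subst he; omega
      refine ⟨y, List.mem_cons_of_mem _ hyt, ?_⟩
      rw [List.count_cons_of_ne (Ne.symm hxy), hyc]
      simp only [pvMc]
      omega

theorem pvFilt_nil (v : Int) : pvFilt [] v = [] := rfl

theorem pvFilt_eq_nil (t : List String) (v : Int) (h : pvMc t < v) : pvFilt t v = [] := by
  unfold pvFilt
  rw [List.filter_eq_nil_iff]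
  intro y hy
  rw [PySem.List.dedup_eq_ofList, PySem.Set.mem_ofList] at hy
  have := pvMc_ub t y hy
  simp only [beq_iff_eq]
  omega

theorem pvFilt_cons (x : String) (t : List String) (v : Int)
    (h : (t.count x : Int) ≠ v) :
    pvFilt (x :: t) v =
      (if (t.count x : Int) + 1 = v then [x] else []) ++ pvFilt t v := by
  have htail : ((PySem.Set.ofList t).discard x).filter
        (fun y => ((((x :: t).count y : Int)) == v))
      = (PySem.Set.ofList t).filter (fun y => (((t.count y : Int)) == v)) := by
    unfold PySem.Set.discard
    rw [List.filter_filter]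
    refine List.filter_congr ?_
    intro y _
    by_cases hxy : y = x
    · subst hxy
      rw [List.count_cons_self]
      simp only [beq_self_eq_true, Bool.not_true, Bool.and_false]
      have : ((t.count y : Int) == v) = false := by simpa using h
      rw [this]
    · rw [List.count_cons_of_ne (Ne.symm hxy)]
      simp [hxy]
  unfold pvFilt
  rw [PySem.List.dedup_eq_ofList, PySem.List.dedup_eq_ofList, PySem.Set.ofList_cons,
    List.filter_cons, htail]
  by_cases hv : (t.count x : Int) + 1 = v
  · have : (((x :: t).count x : Int) == v) = true := by
      rw [List.count_cons_self]; push_cast; simpa using hv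
    rw [this, if_pos hv]
    simp
  · have : (((x :: t).count x : Int) == v) = false := by
      rw [List.count_cons_self]; push_cast; simpa using hv
    rw [this, if_neg hv]
    simp

theorem pvLoopA_closed (t : List String) : ∀ (m : Int) (res : List String), 0 ≤ m →
    pvLoopA (m, res) t =
      if pvMc t > m then (pvMc t, pvFilt t (pvMc t))
      else if pvMc t = m then (m, res ++ pvFilt t m)
      else (m, res) := by
  induction t with
  | nil =>
    intro m res hm
    by_cases h : (0 : Int) = m
    · simp [pvLoopA, pvMc, pvFilt_nil, ← h]
    · have h0 : ¬ pvMc ([] : List String) > m := by simp [pvMc]; omega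
      have h1 : ¬ pvMc ([] : List String) = m := by simpa [pvMc] using h
      rw [if_neg h0, if_neg h1]
      rfl
  | cons x t ih =>
    intro m res hm
    have hc0 : (0 : Int) ≤ (t.count x : Int) := by positivity
    have hMt0 : 0 ≤ pvMc t := pvMc_nonneg t
    have hK : pvMc (x :: t) = max ((t.count x : Int) + 1) (pvMc t) := by simp only [pvMc]
    have hstep : ∀ st : Int × List String, pvLoopA st (x :: t) =
        if 1 + (t.count x : Int) > st.1 then pvLoopA (1 + (t.count x : Int), [x]) t
        else if 1 + (t.count x : Int) = st.1 then pvLoopA (st.1, st.2 ++ [x]) t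
        else pvLoopA st t := fun st => by simp only [pvLoopA]
    rw [hstep, hK, Int.max_def]
    by_cases h1 : 1 + (t.count x : Int) > m
    · rw [if_pos h1, ih _ _ (by omega)]
      rcases le_or_gt ((t.count x : Int) + 1) (pvMc t) with hmx | hmx
      · rw [if_pos hmx]
        split_ifs <;> try omega
        all_goals simp only [Prod.mk.injEq]
        all_goals refine ⟨by first | trivial | omega, ?_⟩
        all_goals (first
          | rw [pvFilt_cons x t (pvMc t) (by omega)]
          | rw [pvFilt_cons x t ((t.count x : Int) + 1) (by omega)]
          | rw [pvFilt_cons x t m (by omega)])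
        all_goals split_ifs <;> try omega
        all_goals try (rw [pvFilt_eq_nil t (pvMc t) (by omega)])
        all_goals try (rw [pvFilt_eq_nil t ((t.count x : Int) + 1) (by omega)])
        all_goals try (rw [pvFilt_eq_nil t m (by omega)])
        all_goals try simp
        all_goals try (congr 1 <;> omega)
      · rw [if_neg (by omega)]
        split_ifs <;> try omega
        all_goals simp only [Prod.mk.injEq]
        all_goals refine ⟨by first | trivial | omega, ?_⟩
        all_goals (first
          | rw [pvFilt_cons x t (pvMc t) (by omega)]
          | rw [pvFilt_cons x t ((t.count x : Int) + 1) (by omega)]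
          | rw [pvFilt_cons x t m (by omega)])
        all_goals split_ifs <;> try omega
        all_goals try (rw [pvFilt_eq_nil t (pvMc t) (by omega)])
        all_goals try (rw [pvFilt_eq_nil t ((t.count x : Int) + 1) (by omega)])
        all_goals try (rw [pvFilt_eq_nil t m (by omega)])
        all_goals try simp
        all_goals try (congr 1 <;> omega)
    · rw [if_neg h1]
      by_cases h2 : 1 + (t.count x : Int) = m
      · rw [if_pos h2, ih _ _ (by omega)]
        rcases le_or_gt ((t.count x : Int) + 1) (pvMc t) with hmx | hmx
        · rw [if_pos hmx]
          split_ifs <;> try omega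
          all_goals simp only [Prod.mk.injEq]
          all_goals refine ⟨by first | trivial | omega, ?_⟩
          all_goals (first
            | rw [pvFilt_cons x t (pvMc t) (by omega)]
            | rw [pvFilt_cons x t ((t.count x : Int) + 1) (by omega)]
            | rw [pvFilt_cons x t m (by omega)])
          all_goals split_ifs <;> try omega
          all_goals try (rw [pvFilt_eq_nil t (pvMc t) (by omega)])
          all_goals try (rw [pvFilt_eq_nil t ((t.count x : Int) + 1) (by omega)])
          all_goals try (rw [pvFilt_eq_nil t m (by omega)])
          all_goals try simp
          all_goals try (congr 1 <;> omega)
        · rw [if_neg (by omega)]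
          split_ifs <;> try omega
          all_goals simp only [Prod.mk.injEq]
          all_goals refine ⟨by first | trivial | omega, ?_⟩
          all_goals (first
            | rw [pvFilt_cons x t (pvMc t) (by omega)]
            | rw [pvFilt_cons x t ((t.count x : Int) + 1) (by omega)]
            | rw [pvFilt_cons x t m (by omega)])
          all_goals split_ifs <;> try omega
          all_goals try (rw [pvFilt_eq_nil t (pvMc t) (by omega)])
          all_goals try (rw [pvFilt_eq_nil t ((t.count x : Int) + 1) (by omega)])
          all_goals try (rw [pvFilt_eq_nil t m (by omega)])
          all_goals try simp
          all_goals try (congr 1 <;> omega)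
      · rw [if_neg h2, ih _ _ (by omega)]
        rcases le_or_gt ((t.count x : Int) + 1) (pvMc t) with hmx | hmx
        · rw [if_pos hmx]
          split_ifs <;> try omega
          all_goals simp only [Prod.mk.injEq]
          all_goals refine ⟨by first | trivial | omega, ?_⟩
          all_goals (first
            | rw [pvFilt_cons x t (pvMc t) (by omega)]
            | rw [pvFilt_cons x t ((t.count x : Int) + 1) (by omega)]
            | rw [pvFilt_cons x t m (by omega)])
          all_goals split_ifs <;> try omega
          all_goals try (rw [pvFilt_eq_nil t (pvMc t) (by omega)])
          all_goals try (rw [pvFilt_eq_nil t ((t.count x : Int) + 1) (by omega)])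
          all_goals try (rw [pvFilt_eq_nil t m (by omega)])
          all_goals try simp
          all_goals try (congr 1 <;> omega)
        · rw [if_neg (by omega)]
          split_ifs <;> try omega
          all_goals simp only [Prod.mk.injEq]
          all_goals refine ⟨by first | trivial | omega, ?_⟩
          all_goals (first
            | rw [pvFilt_cons x t (pvMc t) (by omega)]
            | rw [pvFilt_cons x t ((t.count x : Int) + 1) (by omega)]
            | rw [pvFilt_cons x t m (by omega)])
          all_goals split_ifs <;> try omega
          all_goals try (rw [pvFilt_eq_nil t (pvMc t) (by omega)])
          all_goals try (rw [pvFilt_eq_nil t ((t.count x : Int) + 1) (by omega)])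
          all_goals try (rw [pvFilt_eq_nil t m (by omega)])
          all_goals try simp
          all_goals try (congr 1 <;> omega)

theorem pvFoldCount (l : List String) (a : String) : ∀ c : Int,
    l.foldl (fun c x => if a == x then c + 1 else c) c = c + l.count a := by
  induction l with
  | nil => intro c; simp
  | cons y t ih =>
    intro c
    by_cases h : a = y
    · subst h
      rw [List.foldl_cons, List.count_cons_self]
      simp only [beq_self_eq_true, if_pos]
      rw [ih]
      push_cast; ring
    · rw [List.foldl_cons, List.count_cons_of_ne (Ne.symm h)]
      have : (a == y) = false := by simpa using h
      rw [this]
      simp only [Bool.false_eq_true, if_false]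
      exact ih c

theorem pvOuter (cs : List String) : ∀ (fuel k : Nat) (st : Int × List String),
    cs.length ≤ k + fuel →
    (PySem.List.pyRange (k : Int) (cs.length : Int) 1).foldl
      (fun (st : Int × List String) i =>
        if (PySem.List.pyRange (i + 1) (cs.length : Int) 1).foldl
          (fun c j => if PySem.List.pyGetD cs i "" == PySem.List.pyGetD cs j "" then c + 1 else c) 1 > st.1
        then ((PySem.List.pyRange (i + 1) (cs.length : Int) 1).foldl
          (fun c j => if PySem.List.pyGetD cs i "" == PySem.List.pyGetD cs j "" then c + 1 else c) 1, [PySem.List.pyGetD cs i ""])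
        else if (PySem.List.pyRange (i + 1) (cs.length : Int) 1).foldl
          (fun c j => if PySem.List.pyGetD cs i "" == PySem.List.pyGetD cs j "" then c + 1 else c) 1 == st.1 then (st.1, st.2 ++ [PySem.List.pyGetD cs i ""])
        else st) st
    = pvLoopA st (cs.drop k) := by
  intro fuel
  induction fuel with
  | zero =>
    intro k st h
    rw [PySem.List.pyRange_one_eq_nil (by exact_mod_cast h), List.foldl_nil,
      List.drop_eq_nil_of_le (by omega)]
    rfl
  | succ f ihf =>
    intro k st h
    by_cases hk : k < cs.length
    · rw [PySem.List.pyRange_one_cons (by exact_mod_cast hk), List.foldl_cons]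
      have hget : PySem.List.pyGetD cs (k : Int) "" = cs[k] := by
        rw [PySem.List.pyGetD_natCast, List.getD_eq_getElem _ _ hk]
      have hinner : (PySem.List.pyRange ((k : Int) + 1) (cs.length : Int) 1).foldl
          (fun c j => if PySem.List.pyGetD cs (k : Int) "" == PySem.List.pyGetD cs j "" then c + 1 else c) 1
          = 1 + ((cs.drop (k + 1)).count cs[k] : Int) := by
        rw [PySem.List.foldl_pyRange_pyGetD' cs ""
          (fun c x => if PySem.List.pyGetD cs (k : Int) "" == x then c + 1 else c) 1 (by omega)]
        rw [hget, pvFoldCount]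
        rw [show ((k : Int) + 1).toNat = k + 1 from by omega]
      rw [hinner, hget]
      rw [show (k : Int) + 1 = ((k + 1 : Nat) : Int) from by push_cast; ring]
      rw [ihf (k + 1) _ (by omega)]
      rw [List.drop_eq_getElem_cons hk]
      simp only [pvLoopA, beq_iff_eq]
      split_ifs <;> rfl
    · rw [PySem.List.pyRange_one_eq_nil (by exact_mod_cast (by omega : cs.length ≤ k)),
        List.foldl_nil, List.drop_eq_nil_of_le (by omega)]
      rfl

theorem pvPortA_eq (s : String) :
    most_frequent_chars1 s
      = (pvLoopA (0, []) (s.toList.map (fun c => String.mk [c]))).2 := by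
  simp only [most_frequent_chars1]
  rw [show PySem.Str.len s = (((s.toList.map (fun c => String.mk [c])).length : Nat) : Int) from by
    rw [PySem.Str.len_eq, List.length_map]]
  rw [show (0 : Int) = ((0 : Nat) : Int) from rfl]
  rw [pvOuter (s.toList.map (fun c => String.mk [c])) ((s.toList.map (fun c => String.mk [c])).length) 0 (((0 : Nat) : Int), []) (by omega)]
  rw [List.drop_zero]

theorem pvPortB_eq (s : String) :
    most_frequent_chars1_alt s
      = if s.toList.map (fun c => String.mk [c]) = [] then []
        else pvFilt (s.toList.map (fun c => String.mk [c]))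
               (pvMc (s.toList.map (fun c => String.mk [c]))) := by
  simp only [most_frequent_chars1_alt]
  set cs := s.toList.map (fun c => String.mk [c]) with hcs
  by_cases hnil : cs = []
  · simp [hnil]
  · rw [if_neg (by simpa [List.isEmpty_iff] using hnil), if_neg hnil,
      PySem.Dict.foldl_insert_getD_add_one_eq_counter]
    have hvals : (PySem.Dict.counter cs).values
        = (PySem.Set.ofList cs).map (fun k => ((cs.count k : Int))) := by
      simp [PySem.Dict.values, PySem.Dict.items_counter, List.map_map, Function.comp]
    obtain ⟨m, hm⟩ : ∃ m, PySem.List.max? ((PySem.Dict.counter cs).values) (fun v => v) = some m := by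
      rcases hmo : PySem.List.max? ((PySem.Dict.counter cs).values) (fun v => v) with _ | m
      · rw [PySem.List.max?_eq_none_iff, hvals, List.map_eq_nil_iff] at hmo
        exact absurd (PySem.Set.mem_ofList cs (cs.head hnil) |>.2 (List.head_mem hnil))
          (by simp [hmo])
      · exact ⟨m, rfl⟩
    rw [hm]
    have hub := PySem.List.max?_isMax hm
    have hmem := PySem.List.max?_mem hm
    have hmeq : m = pvMc cs := by
      rw [hvals] at hub hmem
      obtain ⟨k, hk, hkm⟩ := List.mem_map.1 hmem
      have h1 : m ≤ pvMc cs := hkm ▸ pvMc_ub cs k ((PySem.Set.mem_ofList cs k).1 hk)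
      obtain ⟨y, hy, hyc⟩ := pvMc_mem cs hnil
      have h2 : pvMc cs ≤ m := by
        have hmem2 : ((cs.count y : Int)) ∈ (PySem.Set.ofList cs).map (fun k => ((cs.count k : Int))) :=
          List.mem_map_of_mem ((PySem.Set.mem_ofList cs y).2 hy)
        have := hub _ hmem2
        omega
      omega
    rw [PySem.Dict.keys_counter]
    unfold pvFilt
    rw [PySem.List.dedup_eq_ofList]
    refine List.filter_congr ?_
    intro k _
    rw [PySem.Dict.getD_counter, hmeq]

-- ===== VERDICT (by name: the statement is the Claim_ definition above) =====
theorem most_frequent_chars1_spec : Claim_equal_most_frequent_chars1 := by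
  intro s _
  unfold Spec_most_frequent_chars1
  rw [pvPortA_eq, pvPortB_eq]
  by_cases hnil : s.toList.map (fun c => String.mk [c]) = []
  · simp [hnil, pvLoopA]
  · have h1 : (1 : Int) ≤ pvMc (s.toList.map (fun c => String.mk [c])) := by
      obtain ⟨y, hy, hyc⟩ := pvMc_mem _ hnil
      have : 1 ≤ (s.toList.map (fun c => String.mk [c])).count y := List.one_le_count_iff.2 hy
      omega
    rw [pvLoopA_closed _ 0 [] le_rfl, if_pos (by omega)]
    simp [hnil]
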